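-- pv_equiv track=rewrite | github.com/ChangHui-Song/Algorithm | python/programmers/lv1/신규아이디추천.py | replace_common_word
-- ===== SOURCE A (Python) =====
-- def check_case(c :str):
--     if c.isupper():
--         return 1
--     elif not (c.isalnum() or c == '-' or c == '_' or c == '.'):
--         return 2
--     return 0
--
-- def replace_common_word(string :str):
--     result = ''
--     for c in string:
--         check = check_case(c)
--         if check:
--             if check == 1:
--                 result += c.lower()
--             continue
--         if result and c == '.' and result[-1] == '.':
--             continue
--         result += c
--     return result
-- ===== SOURCE B (Python) =====
-- def replace_common_word(string: str):
--     chars = []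
--     for c in string:
--         if c.isupper():
--             chars.append(c.lower())
--         elif c.isalnum() or c in ('-', '_', '.'):
--             chars.append(c)
--     return ''.join(c for prev, c in zip([None] + chars, chars)
--                    if not (c == '.' and prev == '.'))
-- ===== Notes on version B (the rewrite author's own statement) =====
-- stated objective: alternative
-- what changed: A builds the result in one pass with a stateful lookback at result[-1]; B first filters/lowercases into a list, then collapses consecutive dots in a second stateless pass by pairing each kept char with its predecessor via zip and joining.
import Mathlib
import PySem

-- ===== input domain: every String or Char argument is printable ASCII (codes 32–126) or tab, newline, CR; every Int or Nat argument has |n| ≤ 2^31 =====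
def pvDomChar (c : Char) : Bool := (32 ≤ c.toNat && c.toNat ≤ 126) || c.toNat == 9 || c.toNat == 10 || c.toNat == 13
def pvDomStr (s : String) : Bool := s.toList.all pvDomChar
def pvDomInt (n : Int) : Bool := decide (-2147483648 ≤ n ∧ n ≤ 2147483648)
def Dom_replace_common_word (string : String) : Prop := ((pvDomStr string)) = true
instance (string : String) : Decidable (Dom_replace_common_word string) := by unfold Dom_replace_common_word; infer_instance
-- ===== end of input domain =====

-- B replaces A's single pass with a stateful lookback by a filter/lowercase pass
-- followed by a stateless predecessor-zip pass that drops a dot after a dot (alternative decomposition).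

-- ===== PORT A =====
def check_case (c : Char) : Int :=
  if PySem.Chars.isupper c then 1
  else if ¬ (PySem.Chars.isalnum c || c = '-' || c = '_' || c = '.') then 2
  else 0

def replace_common_word_loop (result : List Char) : List Char → List Char
  | [] => result
  | c :: cs =>
    let check := check_case c
    if check ≠ 0 then
      if check = 1 then replace_common_word_loop (result ++ [PySem.Chars.lowerChar c]) cs
      else replace_common_word_loop result cs
    else if result ≠ [] ∧ c = '.' ∧ result.getLast? = some '.' then
      replace_common_word_loop result cs
    else
      replace_common_word_loop (result ++ [c]) cs

def replace_common_word (string : String) : String :=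
  String.mk (replace_common_word_loop [] string.toList)

-- ===== PORT B =====
def altFilter (c : Char) : Option Char :=
  if PySem.Chars.isupper c then some (PySem.Chars.lowerChar c)
  else if PySem.Chars.isalnum c || c = '-' || c = '_' || c = '.' then some c
  else none

def replace_common_word_alt (string : String) : String :=
  let chars := string.toList.filterMap altFilter
  String.mk ((((none : Option Char) :: chars.map some).zip chars).filterMap
    (fun pc => if pc.2 = '.' ∧ pc.1 = some '.' then none else some pc.2))

-- ===== PRECONDITION & SPEC =====
def Spec_replace_common_word (string : String) (out : String) : Prop := out = replace_common_word_alt string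
instance (string : String) (out : String) : Decidable (Spec_replace_common_word string out) := by unfold Spec_replace_common_word; infer_instance

-- ===== CLAIM (what is proved, stated in full; the proofs are below) =====
def Claim_equal_replace_common_word : Prop := ∀ (string : String), Dom_replace_common_word string → Spec_replace_common_word string (replace_common_word string)

-- ===== LEMMAS AND PROOFS =====

/-- Reference collapse pass: drop a dot whose predecessor (in the already filtered list) is a dot. -/
def collapseFrom (prev : Option Char) : List Char → List Char
  | [] => []
  | c :: t => if c = '.' ∧ prev = some '.' then collapseFrom (some c) t
              else c :: collapseFrom (some c) t

theorem zip_filterMap_eq_collapseFrom (l : List Char) (p : Option Char) :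
    ((p :: l.map some).zip l).filterMap
      (fun pc => if pc.2 = '.' ∧ pc.1 = some '.' then none else some pc.2)
    = collapseFrom p l := by
  induction l generalizing p with
  | nil => rfl
  | cons c t ih =>
    simp only [List.map_cons, List.zip_cons_cons, List.filterMap_cons, collapseFrom]
    split_ifs with h
    · exact ih (some c)
    · simp [ih (some c)]

theorem lowerChar_ne_dot (c : Char) (h : PySem.Chars.isupper c = true) :
    PySem.Chars.lowerChar c ≠ '.' := by
  have hb := h
  simp only [PySem.Chars.isupper, Bool.and_eq_true, decide_eq_true_eq] at h
  have h65 : 65 ≤ c.toNat := h.1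
  have h90 : c.toNat ≤ 90 := h.2
  simp only [PySem.Chars.lowerChar, hb, if_pos]
  intro hEq
  have ht : (Char.ofNat (c.toNat + 32)).toNat = ('.' : Char).toNat := by rw [hEq]
  have hv : (Char.ofNat (c.toNat + 32)).toNat = c.toNat + 32 := by
    rw [Char.toNat_ofNat, if_pos]
    unfold Nat.isValidChar
    omega
  rw [hv] at ht
  have : c.toNat + 32 = 46 := ht
  omega

theorem loop_eq_collapse (cs acc : List Char) :
    replace_common_word_loop acc cs
      = acc ++ collapseFrom acc.getLast? (cs.filterMap altFilter) := by
  induction cs generalizing acc with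
  | nil => simp [replace_common_word_loop, collapseFrom]
  | cons c cs ih =>
    simp only [replace_common_word_loop, List.filterMap_cons]
    by_cases hu : PySem.Chars.isupper c = true
    · -- check = 1 : append lowered char
      have hc : check_case c = 1 := by simp [check_case, hu]
      have ha : altFilter c = some (PySem.Chars.lowerChar c) := by simp [altFilter, hu]
      rw [ha]
      simp only [hc]
      rw [ih]
      have hne : ¬ (PySem.Chars.lowerChar c = '.' ∧ acc.getLast? = some '.') :=
        fun hx => lowerChar_ne_dot c hu hx.1
      simp [collapseFrom, hne]
    · by_cases hk : (PySem.Chars.isalnum c || c = '-' || c = '_' || c = '.') = true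
      · -- check = 0 : kept char
        have hc : check_case c = 0 := by simp [check_case, hu, hk]
        have ha : altFilter c = some c := by simp [altFilter, hu, hk]
        rw [ha]
        simp only [hc]
        by_cases hd : c = '.' ∧ acc.getLast? = some '.'
        · have hnn : acc ≠ [] := by
            intro h0
            rw [h0] at hd
            simp at hd
          rw [if_neg (by simp), if_pos ⟨hnn, hd.1, hd.2⟩, ih]
          simp [collapseFrom, hd.1, hd.2]
        · rw [if_neg (by simp), if_neg (fun hx => hd ⟨hx.2.1, hx.2.2⟩), ih]
          simp [collapseFrom, hd]
      · -- check = 2 : dropped char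
        have hc : check_case c = 2 := by simp [check_case, hu, hk]
        have ha : altFilter c = none := by simp [altFilter, hu, hk]
        rw [ha]
        simp only [hc]
        exact ih acc

-- ===== VERDICT (by name: the statement is the Claim_ definition above) =====
theorem replace_common_word_spec : Claim_equal_replace_common_word := by
  intro string _
  unfold Spec_replace_common_word replace_common_word replace_common_word_alt
  simp only [loop_eq_collapse, zip_filterMap_eq_collapseFrom, List.nil_append]
  rfl
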